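-- pv_equiv track=rewrite | github.com/duythong244/Baitap04 | 6.8.py | has_unique_digits_less_than_five
-- ===== SOURCE A (Python) =====
-- def has_unique_digits_less_than_five(n):
--     digits = set()
--     while n > 0:
--         digit = n % 10
--         if digit > 5 or digit in digits:
--             return False
--         digits.add(digit)
--         n //= 10
--     return True
-- ===== SOURCE B (Python) =====
-- def has_unique_digits_less_than_five(n):
--     if n <= 0:
--         return True
--     s = str(n)
--     return len(set(s)) == len(s) and all(c <= '5' for c in s)
-- ===== Notes on version B (the rewrite author's own statement) =====
-- stated objective: simpler
-- what changed: Replaces the early-exiting mod/div loop with an incremental set by a string view of n: uniqueness becomes one len(set(s))==len(s) comparison and the digit-bound check a separate full scan of the decimal string.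
import Mathlib
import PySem

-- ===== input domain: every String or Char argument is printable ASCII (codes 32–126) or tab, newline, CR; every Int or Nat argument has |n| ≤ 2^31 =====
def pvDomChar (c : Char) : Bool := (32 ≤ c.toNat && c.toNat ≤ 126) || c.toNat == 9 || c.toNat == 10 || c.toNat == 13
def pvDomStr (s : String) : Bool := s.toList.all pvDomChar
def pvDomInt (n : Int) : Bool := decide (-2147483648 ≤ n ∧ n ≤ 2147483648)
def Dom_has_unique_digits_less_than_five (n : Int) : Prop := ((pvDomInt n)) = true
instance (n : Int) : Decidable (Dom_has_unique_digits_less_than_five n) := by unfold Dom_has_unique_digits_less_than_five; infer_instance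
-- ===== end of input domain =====

-- B re-states the check on str(n): one set-size comparison for uniqueness plus a
-- separate full scan for the digit bound, instead of A's early-exiting mod/div loop with an
-- incremental set (objective: simpler).

-- ===== PORT A =====
-- the while-loop of A: state is (n, digits)
def hudLoop (n : Int) (digits : PySem.Set Int) : Bool :=
  if _h : 0 < n then
    let digit := PySem.Int.mod n 10
    if digit > 5 || PySem.Set.contains digits digit then false
    else hudLoop (PySem.Int.floordiv n 10) (PySem.Set.add digits digit)
  else true
termination_by n.toNat
decreasing_by
  rw [PySem.Int.floordiv_eq_ediv_of_pos (by norm_num : (0:Int) < 10)]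
  omega

def has_unique_digits_less_than_five (n : Int) : Bool :=
  hudLoop n PySem.Set.empty

-- ===== PORT B =====
def has_unique_digits_less_than_five_alt (n : Int) : Bool :=
  if n ≤ 0 then true
  else
    let s := PySem.Int.toStr n
    ((PySem.Set.ofList s.toList).length == s.toList.length)
      && s.toList.all (fun c => decide (c ≤ '5'))

-- ===== PRECONDITION & SPEC =====
def Spec_has_unique_digits_less_than_five (n : Int) (out : Bool) : Prop := out = has_unique_digits_less_than_five_alt n
instance (n : Int) (out : Bool) : Decidable (Spec_has_unique_digits_less_than_five n out) := by unfold Spec_has_unique_digits_less_than_five; infer_instance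

-- ===== CLAIM (what is proved, stated in full; the proofs are below) =====
def Claim_equal_has_unique_digits_less_than_five : Prop := ∀ (n : Int), Dom_has_unique_digits_less_than_five n → Spec_has_unique_digits_less_than_five n (has_unique_digits_less_than_five n)

-- ===== LEMMAS AND PROOFS =====

-- A's loop read off the base-10 digit list (least significant first)
def goA : List Nat → PySem.Set Int → Bool
  | [], _ => true
  | d :: ds, s =>
      if (d : Int) > 5 || PySem.Set.contains s (d : Int) then false
      else goA ds (PySem.Set.add s (d : Int))

theorem hudLoop_eq_goA (m : Nat) : ∀ s : PySem.Set Int, hudLoop (m : Int) s = goA (Nat.digits 10 m) s := by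
  induction m using Nat.strong_induction_on with
  | _ m ih =>
    intro s
    rcases Nat.eq_zero_or_pos m with h0 | hpos
    · subst h0; rw [hudLoop]; simp [goA]
    · rw [hudLoop]
      rw [dif_pos (by exact_mod_cast hpos : (0:Int) < (m:Int))]
      have hmod : PySem.Int.mod (m:Int) 10 = ((m % 10 : Nat) : Int) := by
        rw [PySem.Int.mod_eq_emod_of_pos (by norm_num)]
        exact_mod_cast (Int.natCast_mod m 10).symm
      have hdiv : PySem.Int.floordiv (m:Int) 10 = ((m / 10 : Nat) : Int) := by
        rw [PySem.Int.floordiv_eq_ediv_of_pos (by norm_num)]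
        exact_mod_cast (Int.natCast_div m 10).symm
      rw [hmod, hdiv, Nat.digits_def' (by norm_num : 1 < 10) hpos]
      simp only [goA]
      split_ifs with hc
      · rfl
      · exact ih (m / 10) (Nat.div_lt_self hpos (by norm_num)) _

theorem goA_true_iff (ds : List Nat) : ∀ s : PySem.Set Int,
    (goA ds s = true ↔ ds.Nodup ∧ (∀ d ∈ ds, d ≤ 5) ∧ (∀ d ∈ ds, (d : Int) ∉ s)) := by
  induction ds with
  | nil => intro s; simp [goA]
  | cons d ds ih =>
    intro s
    rw [goA]
    split_ifs with hc
    · simp only [false_iff]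
      rintro ⟨-, h5, hs⟩
      simp only [Bool.or_eq_true, decide_eq_true_eq] at hc
      rcases hc with h | h
      · have h5d := h5 d (List.mem_cons_self ..)
        omega
      · exact hs d (List.mem_cons_self ..) ((PySem.Set.contains_iff _ _).mp h)
    · simp only [Bool.or_eq_true, decide_eq_true_eq, not_or] at hc
      have hd5 : (d : Int) ≤ 5 := by omega
      have hds : (d : Int) ∉ s := fun hm => hc.2 ((PySem.Set.contains_iff _ _).mpr hm)
      rw [ih]
      constructor
      · rintro ⟨hnd, h5, hni⟩
        refine ⟨List.nodup_cons.mpr ⟨?_, hnd⟩, ?_, ?_⟩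
        · intro hdm
          exact (hni d hdm) ((PySem.Set.mem_add _ _ _).mpr (Or.inr rfl))
        · intro e he
          rcases List.mem_cons.mp he with rfl | he
          · exact_mod_cast hd5
          · exact h5 e he
        · intro e he
          rcases List.mem_cons.mp he with rfl | he
          · exact hds
          · intro hes
            exact hni e he ((PySem.Set.mem_add _ _ _).mpr (Or.inl hes))
      · rintro ⟨hnd, h5, hni⟩
        refine ⟨(List.nodup_cons.mp hnd).2, ?_, ?_⟩
        · exact fun e he => h5 e (List.mem_cons_of_mem _ he)
        · intro e he hes
          rcases (PySem.Set.mem_add _ _ _).mp hes with hes | hes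
          · exact hni e (List.mem_cons_of_mem _ he) hes
          · have : e = d := by exact_mod_cast hes
            exact (List.nodup_cons.mp hnd).1 (this ▸ he)

-- Nat.toDigits as the reversed digit list rendered with digitChar
theorem toDigitsCore_eq_digits (f : Nat) : ∀ (n : Nat) (ds : List Char), 0 < n → n < f →
    Nat.toDigitsCore 10 f n ds = ((Nat.digits 10 n).map Nat.digitChar).reverse ++ ds := by
  induction f with
  | zero => intro n ds h1 h2; omega
  | succ f ih =>
    intro n ds h1 h2
    rw [Nat.toDigitsCore]
    rw [Nat.digits_def' (by norm_num : 1 < 10) h1]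
    simp only [List.map_cons, List.reverse_cons]
    by_cases h0 : n / 10 = 0
    · rw [if_pos h0, h0]
      simp
    · rw [if_neg h0]
      rw [ih (n / 10) _ (Nat.pos_of_ne_zero h0)
        (by have := Nat.div_lt_self h1 (by norm_num : 1 < 10); omega)]
      simp

theorem toDigits_eq_digits (n : Nat) (h : 0 < n) :
    Nat.toDigits 10 n = ((Nat.digits 10 n).map Nat.digitChar).reverse := by
  rw [Nat.toDigits, toDigitsCore_eq_digits (n + 1) n [] h (by omega), List.append_nil]

-- len(set(xs)) == len(xs) is exactly Nodup
theorem ofList_length_iff {α : Type} [BEq α] [LawfulBEq α] (xs : List α) :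
    (PySem.Set.ofList xs).length = xs.length ↔ xs.Nodup := by
  constructor
  · intro h
    induction xs with
    | nil => exact List.nodup_nil
    | cons x xs ihx =>
      rw [PySem.Set.ofList_cons, List.length_cons, List.length_cons] at h
      have hle1 : ((PySem.Set.ofList xs).discard x).length ≤ (PySem.Set.ofList xs).length := by
        unfold PySem.Set.discard; exact List.length_filter_le _ _
      have hle2 : (PySem.Set.ofList xs).length ≤ xs.length := PySem.Set.length_ofList_le xs
      refine List.nodup_cons.mpr ⟨?_, ihx (by omega)⟩
      intro hx
      have hxo : x ∈ PySem.Set.ofList xs := (PySem.Set.mem_ofList _ _).mpr hx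
      have : ((PySem.Set.ofList xs).discard x).length < (PySem.Set.ofList xs).length := by
        unfold PySem.Set.discard
        exact List.length_filter_lt_length_iff_exists.mpr ⟨x, hxo, by simp⟩
      omega
  · intro h
    rw [PySem.Set.ofList_eq_self_of_nodup xs h]

theorem digitChar_inj_lt10 : ∀ d < 10, ∀ e < 10, Nat.digitChar d = Nat.digitChar e → d = e := by decide

theorem digitChar_le5_iff : ∀ d < 10, (decide (Nat.digitChar d ≤ '5')) = decide (d ≤ 5) := by decide

-- ===== VERDICT (by name: the statement is the Claim_ definition above) =====
theorem has_unique_digits_less_than_five_spec : Claim_equal_has_unique_digits_less_than_five := by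
  intro n _
  unfold Spec_has_unique_digits_less_than_five
  unfold has_unique_digits_less_than_five has_unique_digits_less_than_five_alt
  by_cases hn : n ≤ 0
  · rw [hudLoop, dif_neg (by omega), if_pos hn]
  · rw [if_neg hn]
    have hm0 : 0 < n.toNat := by omega
    have hcast : ((n.toNat : Int)) = n := by omega
    -- character list of str(n)
    have hchars : (PySem.Int.toStr n).toList = ((Nat.digits 10 n.toNat).map Nat.digitChar).reverse := by
      rw [PySem.Int.toList_toStr, PySem.Int.toChars, if_neg (by omega : ¬ n < 0)]
      exact toDigits_eq_digits n.toNat hm0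
    set D : List Nat := Nat.digits 10 n.toNat with hD
    have hlt10 : ∀ d ∈ D, d < 10 := fun d hd => Nat.digits_lt_base (by norm_num) hd
    -- A-side characterisation
    have hA : hudLoop n PySem.Set.empty = true ↔ D.Nodup ∧ (∀ d ∈ D, d ≤ 5) := by
      rw [← hcast, hudLoop_eq_goA, goA_true_iff, ← hD]
      constructor
      · rintro ⟨h1, h2, -⟩; exact ⟨h1, h2⟩
      · rintro ⟨h1, h2⟩; exact ⟨h1, h2, fun d _ h => (List.not_mem_nil h)⟩
    -- B-side characterisation
    have hB : (((PySem.Set.ofList (PySem.Int.toStr n).toList).length == (PySem.Int.toStr n).toList.length)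
        && (PySem.Int.toStr n).toList.all (fun c => decide (c ≤ '5'))) = true
        ↔ D.Nodup ∧ (∀ d ∈ D, d ≤ 5) := by
      rw [Bool.and_eq_true, beq_iff_eq, ofList_length_iff, List.all_eq_true, hchars]
      constructor
      · rintro ⟨hnd, hall⟩
        have hnd' : (D.map Nat.digitChar).Nodup := List.nodup_reverse.mp hnd
        refine ⟨hnd'.of_map, fun d hd => ?_⟩
        have := hall (Nat.digitChar d) (by simp [List.mem_reverse]; exact ⟨d, hd, rfl⟩)
        have h10 := hlt10 d hd
        rw [digitChar_le5_iff d h10] at this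
        exact of_decide_eq_true this
      · rintro ⟨hnd, hall⟩
        refine ⟨List.nodup_reverse.mpr (List.Nodup.map_on ?_ hnd), ?_⟩
        · intro a ha b hb hab
          exact digitChar_inj_lt10 a (hlt10 a ha) b (hlt10 b hb) hab
        · intro c hc
          rw [List.mem_reverse, List.mem_map] at hc
          obtain ⟨d, hd, rfl⟩ := hc
          rw [digitChar_le5_iff d (hlt10 d hd)]
          exact decide_eq_true (hall d hd)
    exact Bool.coe_iff_coe.mp (hA.trans hB.symm)
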